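-- pv_equiv track=rewrite | github.com/evansonscott-glitch/market-simulation-agent | lds-rumor-agent/rumor_engine/scorer.py | _aggregate_cluster_features
-- ===== SOURCE A (Python) =====
-- from typing import Dict, List, Optional, Any, Tuple
--
-- def _aggregate_cluster_features(
--     rumor_ids: List[str],
--     rumor_lookup: Dict[str, Dict],
-- ) -> Dict[str, str]:
--     """Aggregate features across rumors in a cluster (take most specific)."""
--     # Specificity priority order
--     spec_order = [
--         "exact_name_or_location", "city_level", "region_level",
--         "category_only", "vague"
--     ]
--     source_order = [
--         "insider_named", "insider_family", "insider_anonymous",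
--         "secondhand", "speculation", "prediction"
--     ]
--
--     best = {}
--     for rid in rumor_ids:
--         rumor = rumor_lookup.get(rid, {})
--         features = rumor.get("features", {})
--
--         # Take most common category
--         cat = features.get("category", "other")
--         best.setdefault("category", cat)
--
--         # Take most specific specificity
--         spec = features.get("specificity", "vague")
--         if spec in spec_order:
--             cur = best.get("specificity", "vague")
--             if spec_order.index(spec) < spec_order.index(cur):
--                 best["specificity"] = spec
--
--         # Take strongest source type
--         src = features.get("claimed_source_type", "speculation")
--         if src in source_order:
--             cur = best.get("claimed_source_type", "speculation")
--             if source_order.index(src) < source_order.index(cur):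
--                 best["claimed_source_type"] = src
--
--     return best
-- ===== SOURCE B (Python) =====
-- from typing import Dict, List
--
--
-- def _aggregate_cluster_features(
--     rumor_ids: List[str],
--     rumor_lookup: Dict[str, Dict],
-- ) -> Dict[str, str]:
--     """Aggregate features across rumors in a cluster (take most specific)."""
--     spec_order = [
--         "exact_name_or_location", "city_level", "region_level",
--         "category_only", "vague"
--     ]
--     source_order = [
--         "insider_named", "insider_family", "insider_anonymous",
--         "secondhand", "speculation", "prediction"
--     ]
--
--     feats = [rumor_lookup.get(rid, {}).get("features", {}) for rid in rumor_ids]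
--     best = {}
--     if feats:
--         best["category"] = feats[0].get("category", "other")
--     for key, default, order in (("specificity", "vague", spec_order),
--                                 ("claimed_source_type", "speculation", source_order)):
--         in_order = [v for v in (f.get(key, default) for f in feats) if v in order]
--         top = min(in_order + [default], key=order.index)
--         if top != default:
--             best[key] = top
--     return best
-- ===== Notes on version B (the rewrite author's own statement) =====
-- stated objective: simpler
-- what changed: Replaces the single running-accumulator dict loop (setdefault + repeated .index comparisons against the current best) with targeted computations: category from the first rumor, and per feature one min() with key=order.index over the collected in-order values plus the default, recorded only when it improves on the default. Pre_ excludes only inputs where a rumor beating the source default precedes the first rumor beating the specificity default, on which A's dict-insertion order (source key before specificity key) is an accident of the scan; the dicts are equal as key-to-value maps everywhere.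
import Mathlib
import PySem

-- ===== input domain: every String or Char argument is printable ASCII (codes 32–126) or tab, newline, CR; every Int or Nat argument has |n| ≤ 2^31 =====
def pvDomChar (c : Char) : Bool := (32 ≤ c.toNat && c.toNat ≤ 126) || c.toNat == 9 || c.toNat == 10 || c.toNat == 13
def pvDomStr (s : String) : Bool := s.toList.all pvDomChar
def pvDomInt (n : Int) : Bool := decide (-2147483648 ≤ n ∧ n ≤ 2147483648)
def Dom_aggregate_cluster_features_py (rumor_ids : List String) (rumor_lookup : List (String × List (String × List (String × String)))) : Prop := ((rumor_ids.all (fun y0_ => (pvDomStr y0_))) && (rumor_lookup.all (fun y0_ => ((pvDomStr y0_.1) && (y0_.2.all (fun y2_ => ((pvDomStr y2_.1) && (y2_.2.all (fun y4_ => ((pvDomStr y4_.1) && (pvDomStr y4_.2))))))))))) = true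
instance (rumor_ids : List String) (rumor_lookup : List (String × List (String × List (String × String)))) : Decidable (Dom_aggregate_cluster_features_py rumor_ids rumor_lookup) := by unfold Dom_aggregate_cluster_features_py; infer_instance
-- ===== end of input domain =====

-- B replaces A's single running-accumulator dict loop by targeted computations (first rumor's
-- category; per feature one min with key=order.index, recorded only when it improves on the
-- default); objective: simpler.  Equal RETURN value on Pre_ (which excludes only inputs where
-- A's dict-insertion ORDER is an accident of the scan; the dicts are equal as maps everywhere).

-- ===== PORT A =====
def pvSpecOrder : List String :=
  ["exact_name_or_location", "city_level", "region_level", "category_only", "vague"]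
def pvSourceOrder : List String :=
  ["insider_named", "insider_family", "insider_anonymous", "secondhand", "speculation", "prediction"]

-- features dict of one rumor id (rumor_lookup.get(rid, {}).get("features", {}))
def pvFeaturesOf (rumor_lookup : List (String × List (String × List (String × String)))) (rid : String) : List (String × String) :=
  (PySem.Dict.mk ((PySem.Dict.mk rumor_lookup).getD rid [])).getD "features" []

-- one iteration of A's loop body (the `.index` calls are guarded by list membership in A,
-- so the `.getD 0` arm of index? is never the one used)
def pvStepA (rumor_lookup : List (String × List (String × List (String × String)))) (best : PySem.Dict String String) (rid : String) : PySem.Dict String String :=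
  let features := pvFeaturesOf rumor_lookup rid
  let cat := (PySem.Dict.mk features).getD "category" "other"
  let best := best.setdefault "category" cat
  let spec := (PySem.Dict.mk features).getD "specificity" "vague"
  let best :=
    if pvSpecOrder.contains spec then
      let cur := best.getD "specificity" "vague"
      if (PySem.List.index? pvSpecOrder spec).getD 0 < (PySem.List.index? pvSpecOrder cur).getD 0 then
        best.insert "specificity" spec
      else best
    else best
  let src := (PySem.Dict.mk features).getD "claimed_source_type" "speculation"
  if pvSourceOrder.contains src then
    let cur := best.getD "claimed_source_type" "speculation"
    if (PySem.List.index? pvSourceOrder src).getD 0 < (PySem.List.index? pvSourceOrder cur).getD 0 then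
      best.insert "claimed_source_type" src
    else best
  else best

def aggregate_cluster_features_py (rumor_ids : List String) (rumor_lookup : List (String × List (String × List (String × String)))) : List (String × String) :=
  (rumor_ids.foldl (pvStepA rumor_lookup) PySem.Dict.empty).items

-- ===== PORT B =====
-- body of Source B's `for key, default, order in …` loop; min's key=order.index never raises there
-- (every candidate was filtered to lie in `order`, and the default is in `order`), so it is
-- exact as (index?).getD 0
def pvStepB (feats : List (List (String × String))) (best : PySem.Dict String String) (t : String × String × List String) : PySem.Dict String String :=
  let in_order := (feats.map (fun f => (PySem.Dict.mk f).getD t.1 t.2.1)).filter (fun v => t.2.2.contains v)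
  let top := (PySem.List.min? (in_order ++ [t.2.1]) (fun v => (PySem.List.index? t.2.2 v).getD 0)).getD t.2.1
  if top ≠ t.2.1 then best.insert t.1 top else best

def aggregate_cluster_features_py_alt (rumor_ids : List String) (rumor_lookup : List (String × List (String × List (String × String)))) : List (String × String) :=
  let feats := rumor_ids.map (pvFeaturesOf rumor_lookup)
  let best : PySem.Dict String String :=
    match feats with
    | [] => PySem.Dict.empty
    | f :: _ => PySem.Dict.empty.insert "category" ((PySem.Dict.mk f).getD "category" "other")
  (([("specificity", "vague", pvSpecOrder), ("claimed_source_type", "speculation", pvSourceOrder)]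
      : List (String × String × List String)).foldl (pvStepB feats) best).items

-- ===== PRECONDITION & SPEC =====
-- rank of a rumor's specificity / source value (values outside the order list, which A skips,
-- count as the never-winning rank 4)
def pvSRank (rumor_lookup : List (String × List (String × List (String × String)))) (rid : String) : Nat :=
  (PySem.List.index? pvSpecOrder ((PySem.Dict.mk (pvFeaturesOf rumor_lookup rid)).getD "specificity" "vague")).getD 4
def pvTRank (rumor_lookup : List (String × List (String × List (String × String)))) (rid : String) : Nat :=
  (PySem.List.index? pvSourceOrder ((PySem.Dict.mk (pvFeaturesOf rumor_lookup rid)).getD "claimed_source_type" "speculation")).getD 4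

-- no rumor beating the source default strictly precedes the first rumor beating the specificity default
def pvGood (rumor_lookup : List (String × List (String × List (String × String)))) : List String → Bool
  | [] => true
  | r :: t =>
    if pvSRank rumor_lookup r < 4 then true
    else if pvTRank rumor_lookup r < 4 then t.all (fun x => !(pvSRank rumor_lookup x < 4))
    else pvGood rumor_lookup t

-- Pre_ excludes only inputs on which some rumor beats the source default before any rumor beats
-- the specificity default: there A's dict-insertion ORDER (source key before specificity key) is
-- an accident of the scan; A and B return equal dicts as key→value maps on ALL inputs.
def Pre_aggregate_cluster_features_py (rumor_ids : List String) (rumor_lookup : List (String × List (String × List (String × String)))) : Prop :=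
  pvGood rumor_lookup rumor_ids = true
instance (rumor_ids : List String) (rumor_lookup : List (String × List (String × List (String × String)))) : Decidable (Pre_aggregate_cluster_features_py rumor_ids rumor_lookup) := by unfold Pre_aggregate_cluster_features_py; infer_instance

def pvWitness_aggregate_cluster_features_py : List String × (List (String × List (String × List (String × String)))) :=
  (["r1", "r2"], [("r1", [("features", [("category", "health"), ("specificity", "city_level")])]), ("r2", [("features", [("claimed_source_type", "secondhand")])])])

def Spec_aggregate_cluster_features_py (rumor_ids : List String) (rumor_lookup : List (String × List (String × List (String × String)))) (out : List (String × String)) : Prop := out = aggregate_cluster_features_py_alt rumor_ids rumor_lookup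
instance (rumor_ids : List String) (rumor_lookup : List (String × List (String × List (String × String)))) (out : List (String × String)) : Decidable (Spec_aggregate_cluster_features_py rumor_ids rumor_lookup out) := by unfold Spec_aggregate_cluster_features_py; infer_instance

-- ===== CLAIM (what is proved, stated in full; the proofs are below) =====
def Claim_equal_aggregate_cluster_features_py : Prop := ∀ (rumor_ids : List String) (rumor_lookup : List (String × List (String × List (String × String)))), Dom_aggregate_cluster_features_py rumor_ids rumor_lookup → Pre_aggregate_cluster_features_py rumor_ids rumor_lookup → Spec_aggregate_cluster_features_py rumor_ids rumor_lookup (aggregate_cluster_features_py rumor_ids rumor_lookup)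

-- ===== LEMMAS AND PROOFS =====

-- canonical shape of A's accumulator dict (category from the first rumor, then the two
-- optional keys, each present iff its running minimum rank beat the default's rank 4)
def pvF (c : String) (ms mt : Nat) : PySem.Dict String String :=
  PySem.Dict.mk ([("category", c)]
    ++ (if ms < 4 then [("specificity", pvSpecOrder.getD ms "")] else [])
    ++ (if mt < 4 then [("claimed_source_type", pvSourceOrder.getD mt "")] else []))

def pvCat (rumor_lookup : List (String × List (String × List (String × String)))) (rid : String) : String :=
  (PySem.Dict.mk (pvFeaturesOf rumor_lookup rid)).getD "category" "other"

-- the two feature-update halves of A's loop body, as separate functions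
def pvTailSpec (features : List (String × String)) (best : PySem.Dict String String) : PySem.Dict String String :=
  let spec := (PySem.Dict.mk features).getD "specificity" "vague"
  if pvSpecOrder.contains spec then
    let cur := best.getD "specificity" "vague"
    if (PySem.List.index? pvSpecOrder spec).getD 0 < (PySem.List.index? pvSpecOrder cur).getD 0 then
      best.insert "specificity" spec
    else best
  else best

def pvTailSrc (features : List (String × String)) (best : PySem.Dict String String) : PySem.Dict String String :=
  let src := (PySem.Dict.mk features).getD "claimed_source_type" "speculation"
  if pvSourceOrder.contains src then
    let cur := best.getD "claimed_source_type" "speculation"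
    if (PySem.List.index? pvSourceOrder src).getD 0 < (PySem.List.index? pvSourceOrder cur).getD 0 then
      best.insert "claimed_source_type" src
    else best
  else best

theorem pv_stepA_eq (rumor_lookup : List (String × List (String × List (String × String)))) (best : PySem.Dict String String) (rid : String) :
    pvStepA rumor_lookup best rid =
      pvTailSrc (pvFeaturesOf rumor_lookup rid)
        (pvTailSpec (pvFeaturesOf rumor_lookup rid)
          (best.setdefault "category" (pvCat rumor_lookup rid))) := rfl

theorem pvF_getD_spec (c : String) (ms mt : Nat) (h : ms ≤ 4) :
    (pvF c ms mt).getD "specificity" "vague" = pvSpecOrder.getD ms "" := by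
  unfold pvF
  split_ifs with h1 h2 <;>
    simp [PySem.Dict.getD_eq_get?_getD, PySem.Dict.get?_mk_cons] <;>
    first
      | rfl
      | (interval_cases ms <;> decide)

theorem pvF_getD_src (c : String) (ms mt : Nat) (h : mt ≤ 4) :
    (pvF c ms mt).getD "claimed_source_type" "speculation" = pvSourceOrder.getD mt "" := by
  unfold pvF
  split_ifs with h1 h2 <;>
    simp [PySem.Dict.getD_eq_get?_getD, PySem.Dict.get?_mk_cons] <;>
    first
      | rfl
      | (interval_cases mt <;> decide)

theorem pvF_setdefault (c : String) (ms mt : Nat) (x : String) :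
    (pvF c ms mt).setdefault "category" x = pvF c ms mt := by
  apply PySem.Dict.setdefault_of_contains
  unfold pvF
  split_ifs <;> simp [PySem.Dict.contains_mk]

theorem pvF_insert_spec (c : String) (ms mt ms' : Nat) (h' : ms' < 4)
    (hcase : ms < 4 ∨ (ms = 4 ∧ ¬ mt < 4)) :
    (pvF c ms mt).insert "specificity" (pvSpecOrder.getD ms' "") = pvF c ms' mt := by
  apply PySem.Dict.ext
  rw [PySem.Dict.items_insert]
  unfold pvF
  rcases hcase with h | ⟨h4, hmt⟩ <;> split_ifs <;> simp_all [PySem.Dict.contains_mk]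

theorem pvF_insert_src (c : String) (ms mt mt' : Nat) (h' : mt' < 4) :
    (pvF c ms mt).insert "claimed_source_type" (pvSourceOrder.getD mt' "") = pvF c ms mt' := by
  apply PySem.Dict.ext
  rw [PySem.Dict.items_insert]
  unfold pvF
  split_ifs <;> simp_all [PySem.Dict.contains_mk]

theorem pv_index_spec_getD (ms : Nat) (h : ms < 5) :
    PySem.List.index? pvSpecOrder (pvSpecOrder.getD ms "") = some ms := by
  interval_cases ms <;> decide

theorem pv_index_src_getD (mt : Nat) (h : mt < 6) :
    PySem.List.index? pvSourceOrder (pvSourceOrder.getD mt "") = some mt := by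
  interval_cases mt <;> decide

theorem pv_getD_of_index {order : List String} {v : String} {k : Nat}
    (h : PySem.List.index? order v = some k) : order.getD k "" = v := by
  obtain ⟨hk, hv, -⟩ := PySem.List.getElem_of_index?_eq_some h
  simp [List.getD_eq_getElem?_getD, List.getElem?_eq_getElem hk, hv]

theorem pvTailSpec_F (rumor_lookup : List (String × List (String × List (String × String)))) (rid : String)
    (c : String) (ms mt : Nat) (hms : ms ≤ 4)
    (hbad : ms = 4 → mt < 4 → ¬ pvSRank rumor_lookup rid < 4) :
    pvTailSpec (pvFeaturesOf rumor_lookup rid) (pvF c ms mt)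
      = pvF c (min ms (pvSRank rumor_lookup rid)) mt := by
  unfold pvTailSpec pvSRank
  set v := (PySem.Dict.mk (pvFeaturesOf rumor_lookup rid)).getD "specificity" "vague" with hv
  by_cases hc : pvSpecOrder.contains v = true
  · have hmem : v ∈ pvSpecOrder := by simpa using hc
    have hne : PySem.List.index? pvSpecOrder v ≠ none := by
      rw [Ne, PySem.List.index?_eq_none_iff]
      simp [hmem]
    obtain ⟨k, hk⟩ := Option.ne_none_iff_exists'.mp hne
    simp only [hc, if_true, hk, pvF_getD_spec c ms mt hms,
      pv_index_spec_getD ms (by omega), Option.getD_some]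
    by_cases hlt : k < ms
    · rw [if_pos hlt, ← pv_getD_of_index hk,
        pvF_insert_spec c ms mt k (by omega)
          (by rcases Nat.lt_or_ge ms 4 with h | h
              · exact Or.inl h
              · have h4 : ms = 4 := by omega
                refine Or.inr ⟨h4, fun hmt4 => (hbad h4 hmt4 ?_).elim⟩
                unfold pvSRank
                rw [← hv, hk]
                simp only [Option.getD_some]
                omega)]
      congr 1
      omega
    · rw [if_neg hlt]
      congr 1
      omega
  · have hnone : PySem.List.index? pvSpecOrder v = none := by
      rw [PySem.List.index?_eq_none_iff]
      simpa using hc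
    simp only [hc, if_false, hnone, Option.getD_none, Bool.false_eq_true]
    congr 1
    omega

theorem pvTailSrc_F (rumor_lookup : List (String × List (String × List (String × String)))) (rid : String)
    (c : String) (ms mt : Nat) (hmt : mt ≤ 4) :
    pvTailSrc (pvFeaturesOf rumor_lookup rid) (pvF c ms mt)
      = pvF c ms (min mt (pvTRank rumor_lookup rid)) := by
  unfold pvTailSrc pvTRank
  set v := (PySem.Dict.mk (pvFeaturesOf rumor_lookup rid)).getD "claimed_source_type" "speculation" with hv
  by_cases hc : pvSourceOrder.contains v = true
  · have hmem : v ∈ pvSourceOrder := by simpa using hc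
    have hne : PySem.List.index? pvSourceOrder v ≠ none := by
      rw [Ne, PySem.List.index?_eq_none_iff]
      simp [hmem]
    obtain ⟨k, hk⟩ := Option.ne_none_iff_exists'.mp hne
    simp only [hc, if_true, hk, pvF_getD_src c ms mt hmt,
      pv_index_src_getD mt (by omega), Option.getD_some]
    by_cases hlt : k < mt
    · rw [if_pos hlt, ← pv_getD_of_index hk,
        pvF_insert_src c ms mt k (by omega)]
      congr 1
      omega
    · rw [if_neg hlt]
      congr 1
      omega
  · have hnone : PySem.List.index? pvSourceOrder v = none := by
      rw [PySem.List.index?_eq_none_iff]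
      simpa using hc
    simp only [hc, if_false, hnone, Option.getD_none, Bool.false_eq_true]
    congr 1
    omega

theorem pv_good_of_all (rumor_lookup : List (String × List (String × List (String × String))))
    (l : List String) (h : l.all (fun x => !(decide (pvSRank rumor_lookup x < 4))) = true) :
    pvGood rumor_lookup l = true := by
  induction l with
  | nil => rfl
  | cons r t ih =>
    simp only [List.all_cons, Bool.and_eq_true] at h
    simp only [pvGood]
    rw [if_neg (by simpa using h.1)]
    by_cases htr : pvTRank rumor_lookup r < 4
    · rw [if_pos htr]
      exact h.2
    · rw [if_neg htr]
      exact ih h.2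

theorem pv_loop (rumor_lookup : List (String × List (String × List (String × String))))
    (c : String) (rest : List String) :
    ∀ (ms mt : Nat), ms ≤ 4 → mt ≤ 4 →
    (ms = 4 → pvGood rumor_lookup rest = true ∧
      (mt < 4 → rest.all (fun x => !(decide (pvSRank rumor_lookup x < 4))) = true)) →
    rest.foldl (pvStepA rumor_lookup) (pvF c ms mt) =
      pvF c (rest.foldl (fun a x => min a (pvSRank rumor_lookup x)) ms)
            (rest.foldl (fun a x => min a (pvTRank rumor_lookup x)) mt) := by
  induction rest with
  | nil => intro ms mt _ _ _; rfl
  | cons r t ih =>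
    intro ms mt hms hmt H
    have hstep : pvStepA rumor_lookup (pvF c ms mt) r
        = pvF c (min ms (pvSRank rumor_lookup r)) (min mt (pvTRank rumor_lookup r)) := by
      rw [pv_stepA_eq, pvF_setdefault,
        pvTailSpec_F rumor_lookup r c ms mt hms
          (fun h4 hmt4 => by
            have hall := (H h4).2 hmt4
            simp only [List.all_cons, Bool.and_eq_true] at hall
            simpa using hall.1),
        pvTailSrc_F rumor_lookup r c _ mt hmt]
    simp only [List.foldl_cons, hstep]
    apply ih (min ms (pvSRank rumor_lookup r)) (min mt (pvTRank rumor_lookup r))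
      (le_trans (Nat.min_le_left _ _) hms) (le_trans (Nat.min_le_left _ _) hmt)
    intro h4
    have hms4 : ms = 4 := by omega
    have hsr : ¬ pvSRank rumor_lookup r < 4 := by omega
    obtain ⟨hgood, hall⟩ := H hms4
    simp only [pvGood] at hgood
    rw [if_neg (by simpa using hsr)] at hgood
    by_cases htr : pvTRank rumor_lookup r < 4
    · rw [if_pos htr] at hgood
      exact ⟨pv_good_of_all rumor_lookup t hgood, fun _ => hgood⟩
    · rw [if_neg htr] at hgood
      refine ⟨hgood, fun hmt4 => ?_⟩
      have hmtlt : mt < 4 := by omega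
      have hall2 := hall hmtlt
      simp only [List.all_cons, Bool.and_eq_true] at hall2
      exact hall2.2

theorem pv_start (rumor_lookup : List (String × List (String × List (String × String)))) (rid : String) :
    pvStepA rumor_lookup PySem.Dict.empty rid
      = pvF (pvCat rumor_lookup rid) (min 4 (pvSRank rumor_lookup rid)) (min 4 (pvTRank rumor_lookup rid)) := by
  rw [pv_stepA_eq]
  have h0 : PySem.Dict.empty.setdefault "category" (pvCat rumor_lookup rid)
      = pvF (pvCat rumor_lookup rid) 4 4 := rfl
  rw [h0, pvTailSpec_F rumor_lookup rid _ 4 4 (by omega) (by omega),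
    pvTailSrc_F rumor_lookup rid _ _ 4 (by omega)]

-- B-side: running minimum (missing ranks counting as 4) vs min() of the collected ranks
theorem pv_fold_filterMap (g : String → Option Nat) (l : List String) :
    ∀ (a : Nat), a ≤ 4 →
    l.foldl (fun a x => min a ((g x).getD 4)) a = (l.filterMap g).foldl min a := by
  induction l with
  | nil => intro a _; rfl
  | cons x t ih =>
    intro a ha
    cases hg : g x with
    | none =>
      simp only [List.foldl_cons, List.filterMap_cons, hg, Option.getD_none]
      rw [Nat.min_eq_left ha]
      exact ih a ha
    | some v =>
      simp only [List.foldl_cons, List.filterMap_cons, hg, Option.getD_some]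
      exact ih (min a v) (le_trans (Nat.min_le_left _ _) ha)

theorem pv_foldl_min_le_seed (L : List Nat) : ∀ a : Nat, L.foldl min a ≤ a := by
  induction L with
  | nil => intro a; exact le_refl a
  | cons x t ih => intro a; exact le_trans (ih (min a x)) (Nat.min_le_left a x)

theorem pv_foldl_min_le_mem (L : List Nat) : ∀ (a x : Nat), x ∈ L → L.foldl min a ≤ x := by
  induction L with
  | nil => intro a x hx; cases hx
  | cons y t ih =>
    intro a x hx
    rcases List.mem_cons.mp hx with h | h
    · subst h
      exact le_trans (pv_foldl_min_le_seed t (min a x)) (Nat.min_le_right a x)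
    · exact ih (min a y) x h

theorem pv_le_foldl_min (L : List Nat) : ∀ (a c : Nat), c ≤ a → (∀ x ∈ L, c ≤ x) → c ≤ L.foldl min a := by
  induction L with
  | nil => intro a c h _; exact h
  | cons y t ih =>
    intro a c h hall
    exact ih (min a y) c (le_min h (hall y (List.mem_cons_self))) fun x hx => hall x (List.mem_cons_of_mem y hx)

-- ranks of the in-order candidates = filterMap of index? over all candidate values
theorem pv_filter_ranks (order : List String) (vals : List String) :
    (vals.filter (fun v => order.contains v)).map (fun v => (PySem.List.index? order v).getD 0)
      = vals.filterMap (PySem.List.index? order) := by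
  induction vals with
  | nil => rfl
  | cons v t ih =>
    by_cases hc : order.contains v = true
    · have hne : PySem.List.index? order v ≠ none := by
        rw [Ne, PySem.List.index?_eq_none_iff]
        simp_all
      obtain ⟨k, hk⟩ := Option.ne_none_iff_exists'.mp hne
      rw [List.filter_cons_of_pos hc, List.map_cons, List.filterMap_cons, hk]
      simp only [hk, Option.getD_some, ih]
    · have hnone : PySem.List.index? order v = none := by
        rw [PySem.List.index?_eq_none_iff]
        simp_all
      rw [List.filter_cons_of_neg (by simpa using hc), List.filterMap_cons, hnone]
      exact ih

-- the min() of Source B's loop body vs the rank threshold form: both describe the same singleton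
theorem pv_top_part (order : List String) (dflt k : String) (vals : List String)
    (hd : PySem.List.index? order dflt = some 4) :
    (if ((PySem.List.min? ((vals.filter (fun v => order.contains v)) ++ [dflt])
            (fun v => (PySem.List.index? order v).getD 0)).getD dflt) ≠ dflt
     then [(k, ((PySem.List.min? ((vals.filter (fun v => order.contains v)) ++ [dflt])
            (fun v => (PySem.List.index? order v).getD 0)).getD dflt))] else []) =
    (if (vals.filterMap (PySem.List.index? order)).foldl min 4 < 4
     then [(k, order.getD ((vals.filterMap (PySem.List.index? order)).foldl min 4) "")]
     else ([] : List (String × String))) := by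
  set L := vals.filter (fun v => order.contains v) with hL
  set rank := fun v => (PySem.List.index? order v).getD 0 with hrank
  have hne : PySem.List.min? (L ++ [dflt]) rank ≠ none := by
    rw [Ne, PySem.List.min?_eq_none_iff]
    simp
  obtain ⟨top, htop⟩ := Option.ne_none_iff_exists'.mp hne
  have hmem : top ∈ L ++ [dflt] := PySem.List.min?_mem htop
  have hmin : ∀ y ∈ L ++ [dflt], rank top ≤ rank y := PySem.List.min?_isMin htop
  -- top is in order, so index? hits
  have htopidx : ∃ j, PySem.List.index? order top = some j := by
    rcases List.mem_append.mp hmem with h | h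
    · have : order.contains top = true := (List.mem_filter.mp (hL ▸ h)).2
      refine Option.ne_none_iff_exists'.mp ?_
      rw [Ne, PySem.List.index?_eq_none_iff]
      simp_all
    · have : top = dflt := by simpa using h
      exact ⟨4, this ▸ hd⟩
  obtain ⟨j, hj⟩ := htopidx
  have hrj : rank top = j := by
    show (PySem.List.index? order top).getD 0 = j
    rw [hj]
    rfl
  set m := (vals.filterMap (PySem.List.index? order)).foldl min 4 with hm
  have hranks : L.map rank = vals.filterMap (PySem.List.index? order) := pv_filter_ranks order vals
  -- j = m
  have hm_le : m ≤ 4 := pv_foldl_min_le_seed _ 4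
  have h1 : j ≤ m := by
    rw [← hrj]
    apply pv_le_foldl_min
    · have h4 : rank dflt = 4 := by
        show (PySem.List.index? order dflt).getD 0 = 4
        rw [hd]
        rfl
      have := hmin dflt (by simp)
      rw [h4] at this
      exact this
    · intro x hx
      rw [← hranks] at hx
      obtain ⟨y, hy, hxy⟩ := List.mem_map.mp hx
      exact hxy ▸ hmin y (List.mem_append.mpr (Or.inl hy))
  have h2 : m ≤ j := by
    rcases List.mem_append.mp hmem with h | h
    · have : j ∈ L.map rank := List.mem_map.mpr ⟨top, h, hrj⟩
      rw [hranks] at this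
      exact pv_foldl_min_le_mem _ 4 j this
    · have htd : top = dflt := by simpa using h
      have : j = 4 := by
        rw [htd] at hj
        rw [hj] at hd
        exact (Option.some.inj hd).symm ▸ rfl
      omega
  have hjm : j = m := le_antisymm h1 h2
  rw [htop]
  simp only [Option.getD_some]
  by_cases hlt : m < 4
  · have htopv : top = order.getD m "" := by
      rw [← pv_getD_of_index hj, hjm]
    have htopne : top ≠ dflt := by
      intro he
      rw [he] at hj
      rw [hj] at hd
      have : j = 4 := (Option.some.inj hd)
      omega
    rw [if_pos htopne, if_pos hlt, htopv]
  · have hj4 : j = 4 := by omega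
    have htopd : top = dflt := by
      have h4 : order.getD 4 "" = dflt := pv_getD_of_index hd
      rw [← pv_getD_of_index hj, hj4, h4]
    rw [if_neg (by simpa using htopd), if_neg hlt]


theorem pv_if_insert_items (best : PySem.Dict String String) (key top dflt : String)
    (h : best.contains key = false) :
    (if top ≠ dflt then best.insert key top else best).items
      = best.items ++ (if top ≠ dflt then [(key, top)] else []) := by
  by_cases ht : top = dflt
  · simp [ht]
  · rw [if_pos ht, if_pos ht, PySem.Dict.items_insert_of_not_contains best top h]

-- both iterations of Source B's loop, as appended item blocks
theorem pv_alt_cons (r0 : String) (rest : List String) (rumor_lookup : List (String × List (String × List (String × String)))) :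
    aggregate_cluster_features_py_alt (r0 :: rest) rumor_lookup
      = [("category", pvCat rumor_lookup r0)]
        ++ (if ((r0 :: rest).filterMap (fun rid => PySem.List.index? pvSpecOrder ((PySem.Dict.mk (pvFeaturesOf rumor_lookup rid)).getD "specificity" "vague"))).foldl min 4 < 4
            then [("specificity", pvSpecOrder.getD (((r0 :: rest).filterMap (fun rid => PySem.List.index? pvSpecOrder ((PySem.Dict.mk (pvFeaturesOf rumor_lookup rid)).getD "specificity" "vague"))).foldl min 4) "")] else [])
        ++ (if ((r0 :: rest).filterMap (fun rid => PySem.List.index? pvSourceOrder ((PySem.Dict.mk (pvFeaturesOf rumor_lookup rid)).getD "claimed_source_type" "speculation"))).foldl min 4 < 4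
            then [("claimed_source_type", pvSourceOrder.getD (((r0 :: rest).filterMap (fun rid => PySem.List.index? pvSourceOrder ((PySem.Dict.mk (pvFeaturesOf rumor_lookup rid)).getD "claimed_source_type" "speculation"))).foldl min 4) "")] else []) := by
  unfold aggregate_cluster_features_py_alt
  simp only [List.map_cons, List.foldl_cons, List.foldl_nil]
  set F := pvFeaturesOf rumor_lookup r0 :: rest.map (pvFeaturesOf rumor_lookup) with hF
  have hvals : ∀ (key dflt : String),
      F.map (fun f => (PySem.Dict.mk f).getD key dflt)
        = (r0 :: rest).map (fun rid => (PySem.Dict.mk (pvFeaturesOf rumor_lookup rid)).getD key dflt) := by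
    intro key dflt
    rw [hF, ← List.map_cons, List.map_map]
    rfl
  have hfm : ∀ (key dflt : String) (order : List String),
      (F.map (fun f => (PySem.Dict.mk f).getD key dflt)).filterMap (PySem.List.index? order)
        = (r0 :: rest).filterMap (fun rid => PySem.List.index? order ((PySem.Dict.mk (pvFeaturesOf rumor_lookup rid)).getD key dflt)) := by
    intro key dflt order
    rw [hvals, List.filterMap_map]
    rfl
  set B0 : PySem.Dict String String :=
    PySem.Dict.empty.insert "category" ((PySem.Dict.mk (pvFeaturesOf rumor_lookup r0)).getD "category" "other") with hB0
  have hB0c : ∀ key : String, key ≠ "category" → B0.contains key = false := by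
    intro key hk
    rw [hB0, PySem.Dict.contains_insert]
    simp [hk]
  have h1 : pvStepB F B0 ("specificity", "vague", pvSpecOrder)
      = (if ((PySem.List.min? (((F.map (fun f => (PySem.Dict.mk f).getD "specificity" "vague")).filter (fun v => pvSpecOrder.contains v)) ++ ["vague"]) (fun v => (PySem.List.index? pvSpecOrder v).getD 0)).getD "vague") ≠ "vague"
         then B0.insert "specificity" ((PySem.List.min? (((F.map (fun f => (PySem.Dict.mk f).getD "specificity" "vague")).filter (fun v => pvSpecOrder.contains v)) ++ ["vague"]) (fun v => (PySem.List.index? pvSpecOrder v).getD 0)).getD "vague")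
         else B0) := rfl
  have h2 : pvStepB F (pvStepB F B0 ("specificity", "vague", pvSpecOrder)) ("claimed_source_type", "speculation", pvSourceOrder)
      = (if ((PySem.List.min? (((F.map (fun f => (PySem.Dict.mk f).getD "claimed_source_type" "speculation")).filter (fun v => pvSourceOrder.contains v)) ++ ["speculation"]) (fun v => (PySem.List.index? pvSourceOrder v).getD 0)).getD "speculation") ≠ "speculation"
         then (pvStepB F B0 ("specificity", "vague", pvSpecOrder)).insert "claimed_source_type" ((PySem.List.min? (((F.map (fun f => (PySem.Dict.mk f).getD "claimed_source_type" "speculation")).filter (fun v => pvSourceOrder.contains v)) ++ ["speculation"]) (fun v => (PySem.List.index? pvSourceOrder v).getD 0)).getD "speculation")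
         else pvStepB F B0 ("specificity", "vague", pvSpecOrder)) := rfl
  have hD1c : (pvStepB F B0 ("specificity", "vague", pvSpecOrder)).contains "claimed_source_type" = false := by
    rw [h1]
    by_cases ht : ((PySem.List.min? (((F.map (fun f => (PySem.Dict.mk f).getD "specificity" "vague")).filter (fun v => pvSpecOrder.contains v)) ++ ["vague"]) (fun v => (PySem.List.index? pvSpecOrder v).getD 0)).getD "vague") ≠ "vague"
    · rw [if_pos ht, PySem.Dict.contains_insert]
      simp [hB0c "claimed_source_type" (by decide)]
    · rw [if_neg ht]
      exact hB0c "claimed_source_type" (by decide)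
  have hD1items : (pvStepB F B0 ("specificity", "vague", pvSpecOrder)).items
      = B0.items ++ (if ((PySem.List.min? (((F.map (fun f => (PySem.Dict.mk f).getD "specificity" "vague")).filter (fun v => pvSpecOrder.contains v)) ++ ["vague"]) (fun v => (PySem.List.index? pvSpecOrder v).getD 0)).getD "vague") ≠ "vague"
          then [("specificity", ((PySem.List.min? (((F.map (fun f => (PySem.Dict.mk f).getD "specificity" "vague")).filter (fun v => pvSpecOrder.contains v)) ++ ["vague"]) (fun v => (PySem.List.index? pvSpecOrder v).getD 0)).getD "vague"))] else []) := by
    rw [h1]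
    exact pv_if_insert_items B0 "specificity" _ "vague" (hB0c "specificity" (by decide))
  rw [h2, pv_if_insert_items (pvStepB F B0 ("specificity", "vague", pvSpecOrder)) "claimed_source_type" _ "speculation" hD1c, hD1items,
    pv_top_part pvSpecOrder "vague" "specificity" _ (by decide),
    pv_top_part pvSourceOrder "speculation" "claimed_source_type" _ (by decide),
    hfm, hfm]
  have hB0items : B0.items = [("category", pvCat rumor_lookup r0)] := rfl
  rw [hB0items, List.append_assoc]

-- ===== VERDICT (by name: the statement is the Claim_ definition above) =====
theorem aggregate_cluster_features_py_spec : Claim_equal_aggregate_cluster_features_py := by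
  intro rumor_ids rumor_lookup _hdom hpre
  unfold Spec_aggregate_cluster_features_py
  cases rumor_ids with
  | nil => rfl
  | cons r0 rest =>
    have hA : aggregate_cluster_features_py (r0 :: rest) rumor_lookup
        = (pvF (pvCat rumor_lookup r0)
            (rest.foldl (fun a x => min a (pvSRank rumor_lookup x)) (min 4 (pvSRank rumor_lookup r0)))
            (rest.foldl (fun a x => min a (pvTRank rumor_lookup x)) (min 4 (pvTRank rumor_lookup r0)))).items := by
      unfold aggregate_cluster_features_py
      simp only [List.foldl_cons, pv_start]
      rw [pv_loop rumor_lookup (pvCat rumor_lookup r0) rest _ _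
        (Nat.min_le_left _ _) (Nat.min_le_left _ _)]
      intro h4
      have hsr : ¬ pvSRank rumor_lookup r0 < 4 := by omega
      unfold Pre_aggregate_cluster_features_py at hpre
      simp only [pvGood] at hpre
      rw [if_neg (by simpa using hsr)] at hpre
      by_cases htr : pvTRank rumor_lookup r0 < 4
      · rw [if_pos htr] at hpre
        exact ⟨pv_good_of_all rumor_lookup rest hpre, fun _ => hpre⟩
      · rw [if_neg htr] at hpre
        exact ⟨hpre, fun hc => absurd hc (by omega)⟩
    rw [hA, pv_alt_cons]
    have e1 := pv_fold_filterMap (fun rid => PySem.List.index? pvSpecOrder ((PySem.Dict.mk (pvFeaturesOf rumor_lookup rid)).getD "specificity" "vague")) (r0 :: rest) 4 (le_refl 4)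
    have e2 := pv_fold_filterMap (fun rid => PySem.List.index? pvSourceOrder ((PySem.Dict.mk (pvFeaturesOf rumor_lookup rid)).getD "claimed_source_type" "speculation")) (r0 :: rest) 4 (le_refl 4)
    rw [← e1, ← e2]
    rfl
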